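-- pv_equiv track=rewrite | github.com/Alex-i-ART/ExcelWork | ExcelWorkV1.0.py | distribute_integer
-- ===== SOURCE A (Python) =====
-- def distribute_integer(total, days=30):
--     base = total // days
--     remainder = total % days
--     daily_values = [base + 1 if i < remainder else base for i in range(days)]
--
--     cumulative_sum = 0
--     cumulative_values = []
--     for value in daily_values:
--         cumulative_sum += value
--         cumulative_values.append(cumulative_sum)
--
--     return cumulative_values
-- ===== SOURCE B (Python) =====
-- def distribute_integer(total, days=30):
--     base = total // days
--     remainder = total % days
--     return [base * (i + 1) + min(i + 1, remainder) for i in range(days)]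
-- ===== Notes on version B (the rewrite author's own statement) =====
-- stated objective: simpler
-- what changed: Replaces the daily-values list plus the running-sum accumulator loop with a single closed-form per-index formula base*(i+1) + min(i+1, remainder).
import Mathlib
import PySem

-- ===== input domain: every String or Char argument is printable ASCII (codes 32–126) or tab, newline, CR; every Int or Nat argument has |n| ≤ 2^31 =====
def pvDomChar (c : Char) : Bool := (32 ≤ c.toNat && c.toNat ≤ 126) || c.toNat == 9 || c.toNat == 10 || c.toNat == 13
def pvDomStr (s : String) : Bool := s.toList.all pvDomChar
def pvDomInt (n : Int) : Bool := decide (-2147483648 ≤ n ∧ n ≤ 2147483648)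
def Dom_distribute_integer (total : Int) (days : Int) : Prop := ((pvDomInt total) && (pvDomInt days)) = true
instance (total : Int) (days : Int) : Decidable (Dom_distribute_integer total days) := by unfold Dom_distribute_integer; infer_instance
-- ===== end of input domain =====

-- B replaces A's daily-values list and running-sum loop by a closed-form per-index
-- formula base*(i+1) + min(i+1, remainder); objective: simpler.


-- ===== PORT A =====
def distribute_integer (total : Int) (days : Int) : List Int :=
  let base := PySem.Int.floordiv total days
  let remainder := PySem.Int.mod total days
  let daily_values := (PySem.List.pyRange 0 days 1).map
    (fun i => if i < remainder then base + 1 else base)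
  (daily_values.foldl
    (fun (st : Int × List Int) value => (st.1 + value, st.2 ++ [st.1 + value]))
    (0, [])).2

-- ===== PORT B =====
def distribute_integer_alt (total : Int) (days : Int) : List Int :=
  let base := PySem.Int.floordiv total days
  let remainder := PySem.Int.mod total days
  (PySem.List.pyRange 0 days 1).map (fun i => base * (i + 1) + min (i + 1) remainder)

-- ===== PRECONDITION & SPEC =====
-- Pre_ excludes days = 0, where Python A raises ZeroDivisionError.
def Pre_distribute_integer (total : Int) (days : Int) : Prop := days ≠ 0
instance (total : Int) (days : Int) : Decidable (Pre_distribute_integer total days) := by unfold Pre_distribute_integer; infer_instance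
def pvWitness_distribute_integer : Int × Int := (7, 3)
def Spec_distribute_integer (total : Int) (days : Int) (out : List Int) : Prop := out = distribute_integer_alt total days
instance (total : Int) (days : Int) (out : List Int) : Decidable (Spec_distribute_integer total days out) := by unfold Spec_distribute_integer; infer_instance

-- ===== CLAIM (what is proved, stated in full; the proofs are below) =====
def Claim_equal_distribute_integer : Prop := ∀ (total : Int) (days : Int), Dom_distribute_integer total days → Pre_distribute_integer total days → Spec_distribute_integer total days (distribute_integer total days)

-- ===== LEMMAS AND PROOFS =====

-- A's running-sum loop over the tail of the range, started at the prefix sum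
-- b*a + min a r, produces exactly B's closed-form values.
theorem pv_loop_eq (b r d : Int) (hr : 0 ≤ r) :
    ∀ (n : Nat) (a : Int) (out : List Int), 0 ≤ a → n = (d - a).toNat →
    (((PySem.List.pyRange a d 1).map (fun i => if i < r then b + 1 else b)).foldl
       (fun (st : Int × List Int) v => (st.1 + v, st.2 ++ [st.1 + v]))
       (b * a + min a r, out)).2
    = out ++ (PySem.List.pyRange a d 1).map (fun i => b * (i + 1) + min (i + 1) r) := by
  intro n
  induction n with
  | zero =>
    intro a out _ hn
    rw [PySem.List.pyRange_one_eq_nil (by omega)]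
    simp
  | succ n ih =>
    intro a out ha hn
    have had : a < d := by omega
    rw [PySem.List.pyRange_one_cons had]
    simp only [List.map_cons, List.foldl_cons]
    have hstep : b * a + min a r + (if a < r then b + 1 else b)
        = b * (a + 1) + min (a + 1) r := by
      split_ifs with h
      · have h1 : min a r = a := by omega
        have h2 : min (a + 1) r = a + 1 := by omega
        rw [h1, h2]; ring
      · have h1 : min a r = r := by omega
        have h2 : min (a + 1) r = r := by omega
        rw [h1, h2]; ring
    rw [hstep, ih (a + 1) (out ++ [b * (a + 1) + min (a + 1) r]) (by omega) (by omega)]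
    simp

-- ===== VERDICT (by name: the statement is the Claim_ definition above) =====
theorem distribute_integer_spec : Claim_equal_distribute_integer := by
  intro total days _ hpre
  unfold Spec_distribute_integer distribute_integer distribute_integer_alt
  by_cases hd : 0 < days
  · have hr : 0 ≤ PySem.Int.mod total days := PySem.Int.mod_nonneg total hd
    have h0 : (PySem.Int.floordiv total days * 0 + min 0 (PySem.Int.mod total days),
        ([] : List Int)) = (0, []) := by
      simp [min_eq_left hr]
    simp only []
    rw [← h0, pv_loop_eq _ _ _ hr (days - 0).toNat 0 [] le_rfl rfl]
    simp
  · rw [PySem.List.pyRange_one_eq_nil (by omega)]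
    simp
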